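-- pv_equiv track=rewrite | github.com/choibigo/Study | 알고리즘 문제풀이/프로그래머스 1단계/명예의 전당.py | solution
-- ===== SOURCE A (Python) =====
-- from heapq import heappush, heappop
-- from collections import deque
--
-- def solution(k, score):
--     score = deque(score)
--     result = list()
--     heap = list()
--
--     for pop_s in score:
--         if len(heap) ==k:
--             if heap[0] < pop_s:
--                 heappop(heap)
--                 heappush(heap, pop_s)
--         else:
--             heappush(heap, pop_s)
--         result.append(heap[0])
--
--     return result
-- ===== SOURCE B (Python) =====
-- def solution(k, score):
--     cur = []
--     result = []
--     for s in score:
--         cur.append(s)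
--         cur_sorted = sorted(cur, reverse=True)
--         result.append(cur_sorted[min(k, len(cur_sorted)) - 1])
--     return result
-- ===== Notes on version B (the rewrite author's own statement) =====
-- stated objective: simpler
-- what changed: Replaces the incrementally maintained bounded min-heap with a plain re-sort of all scores seen so far each day, reading the k-th highest (or the minimum before day k) directly at index min(k, len)-1.
-- outside the precondition, e.g. on solution(-1, [3, 1]): A returns [3, 1], B raises IndexError
import Mathlib
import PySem

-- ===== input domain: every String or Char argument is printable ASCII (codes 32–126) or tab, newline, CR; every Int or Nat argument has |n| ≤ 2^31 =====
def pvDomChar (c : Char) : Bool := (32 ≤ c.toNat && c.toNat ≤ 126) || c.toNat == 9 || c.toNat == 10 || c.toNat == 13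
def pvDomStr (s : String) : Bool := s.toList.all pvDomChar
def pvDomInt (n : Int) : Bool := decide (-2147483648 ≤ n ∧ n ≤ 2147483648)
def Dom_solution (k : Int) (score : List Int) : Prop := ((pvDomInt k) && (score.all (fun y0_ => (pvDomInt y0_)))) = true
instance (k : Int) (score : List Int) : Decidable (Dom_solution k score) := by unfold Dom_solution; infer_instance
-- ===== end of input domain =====

-- B re-sorts the whole prefix each day instead of maintaining a bounded min-heap; simpler, not faster.

-- ===== PORT A =====
-- heapq._siftdown(heap, startpos, pos): newitem = heap[pos] is passed in explicitly
-- (heappush appends it, so the caller knows it); the loop moves parents down and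
-- finally writes newitem — exactly CPython's loop.
def pvSiftdownLoop (h : List Int) (newitem : Int) (startpos pos : Nat) : List Int :=
  if _hp : startpos < pos then
    let parentpos := (pos - 1) / 2
    let parent := h.getD parentpos 0
    if newitem < parent then pvSiftdownLoop (h.set pos parent) newitem startpos parentpos
    else h.set pos newitem
  else h.set pos newitem
termination_by pos
decreasing_by omega

-- heapq._siftup's while loop: move the smaller child up until a leaf is reached;
-- returns the final heap and position.
def pvSiftupLoop (h : List Int) (endpos pos : Nat) : List Int × Nat :=
  let childpos := 2 * pos + 1
  if _hc : childpos < endpos then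
    let rightpos := childpos + 1
    let childpos2 := if rightpos < endpos ∧ ¬ (h.getD childpos 0 < h.getD rightpos 0) then rightpos else childpos
    pvSiftupLoop (h.set pos (h.getD childpos2 0)) endpos childpos2
  else (h, pos)
termination_by endpos - pos
decreasing_by split <;> omega

-- heapq._siftup(heap, pos): save newitem, run the leaf-ward loop, then
-- heap[pos'] = newitem; _siftdown(heap, pos, pos') — the trailing _siftdown's first
-- write always lands on pos', so passing newitem to pvSiftdownLoop is the same.
def pvSiftup (h : List Int) (pos : Nat) : List Int :=
  let newitem := h.getD pos 0
  let r := pvSiftupLoop h h.length pos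
  pvSiftdownLoop r.1 newitem pos r.2

-- heappush: append, then _siftdown(heap, 0, len(heap)-1)
def pvHeappush (heap : List Int) (item : Int) : List Int :=
  pvSiftdownLoop (heap ++ [item]) item 0 heap.length

-- heappop: pop the last element; if the heap is still non-empty, put it at the root
-- and sift up.  (Called in A only on a heap of length k ≥ 1, so the empty-heap
-- IndexError of Python's list.pop cannot occur inside Pre_.)
def pvHeappop (heap : List Int) : Int × List Int :=
  let lastelt := heap.getD (heap.length - 1) 0
  let rest := heap.dropLast
  if rest.isEmpty then (lastelt, [])
  else (rest.getD 0 0, pvSiftup (rest.set 0 lastelt) 0)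

-- A's main loop (heap[0] reads use getD 0: inside Pre_ the heap is never empty there)
def solution (k : Int) (score : List Int) : List Int :=
  (score.foldl (fun (st : List Int × List Int) pop_s =>
      let heap := st.1
      let heap' :=
        if (heap.length : Int) = k then
          if heap.getD 0 0 < pop_s then pvHeappush (pvHeappop heap).2 pop_s else heap
        else pvHeappush heap pop_s
      (heap', st.2 ++ [heap'.getD 0 0])) ([], [])).2

-- ===== PORT B =====
def solution_alt (k : Int) (score : List Int) : List Int :=
  (score.foldl (fun (st : List Int × List Int) s =>
      let cur := st.1 ++ [s]
      let srt := PySem.List.sorted cur (fun x => x) true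
      (cur, st.2 ++ [PySem.List.pyGetD srt (min k (srt.length : Int) - 1) 0])) ([], [])).2

-- ===== PRECONDITION & SPEC =====
-- Pre_ excludes k ≤ 0 (with a non-empty score): there A either raises IndexError
-- (k = 0) or returns the running-minimum list (k < 0, the size-k branch never
-- fires), while B's natural negative index min(k,len)-1 raises IndexError.
def Pre_solution (k : Int) (score : List Int) : Prop := 1 ≤ k ∨ score = []
instance (k : Int) (score : List Int) : Decidable (Pre_solution k score) := by unfold Pre_solution; infer_instance
def pvWitness_solution : Int × List Int := (2, [10, 30, 20])

def Spec_solution (k : Int) (score : List Int) (out : List Int) : Prop := out = solution_alt k score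
instance (k : Int) (score : List Int) (out : List Int) : Decidable (Spec_solution k score out) := by unfold Spec_solution; infer_instance

-- ===== CLAIM (what is proved, stated in full; the proofs are below) =====
def Claim_equal_solution : Prop := ∀ (k : Int) (score : List Int), Dom_solution k score → Pre_solution k score → Spec_solution k score (solution k score)

-- ===== LEMMAS AND PROOFS =====

-- `sorted(cur, reverse=True)` as used by B
def SD (l : List Int) : List Int := PySem.List.sorted l (fun x => x) true

-- binary min-heap property of CPython's heapq, over getD
def HeapProp (h : List Int) : Prop :=
  ∀ i j : Nat, (j = 2*i+1 ∨ j = 2*i+2) → j < h.length → h.getD i 0 ≤ h.getD j 0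

lemma mem_cons_erase {a b : Int} {t : Multiset Int} (hb : b ∈ t) :
    (a ::ₘ t).erase b = a ::ₘ t.erase b := by
  by_cases hba : b = a
  · subst hba
    rw [Multiset.erase_cons_head, Multiset.cons_erase hb]
  · rw [Multiset.erase_cons_tail_of_mem hb]

lemma mset_set (h : List Int) (pos : Nat) (v : Int) (hp : pos < h.length) :
    (↑(h.set pos v) : Multiset Int) = v ::ₘ (↑h : Multiset Int).erase (h.getD pos 0) := by
  induction h generalizing pos with
  | nil => simp at hp
  | cons a t ih =>
    cases pos with
    | zero =>
      show (↑(v :: t) : Multiset Int) = v ::ₘ (a ::ₘ (↑t : Multiset Int)).erase a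
      rw [Multiset.erase_cons_head]
      rfl
    | succ p =>
      have hpl : p < t.length := by simpa using hp
      have hmem : t.getD p 0 ∈ (↑t : Multiset Int) := by
        rw [List.getD_eq_getElem t 0 hpl]
        exact List.getElem_mem hpl
      show (↑(a :: t.set p v) : Multiset Int)
          = v ::ₘ (a ::ₘ (↑t : Multiset Int)).erase (t.getD p 0)
      rw [mem_cons_erase hmem]
      show a ::ₘ (↑(t.set p v) : Multiset Int) = v ::ₘ a ::ₘ ((↑t : Multiset Int)).erase (t.getD p 0)
      rw [ih p hpl, Multiset.cons_swap]

lemma getD_set_ne (h : List Int) (i j : Nat) (v d : Int) (hij : i ≠ j) :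
    (h.set i v).getD j d = h.getD j d := by
  rw [List.getD_eq_getElem?_getD, List.getD_eq_getElem?_getD, List.getElem?_set_ne hij]

lemma sdl_mset (h : List Int) (ni : Int) (st pos : Nat) (hp : pos < h.length) :
    (↑(pvSiftdownLoop h ni st pos) : Multiset Int) = (↑(h.set pos ni) : Multiset Int) := by
  fun_induction pvSiftdownLoop h ni st pos with
  | case1 h pos hsp parentpos parent hlt ih =>
    have hpp : parentpos < pos := by simp only [parentpos]; omega
    rw [ih (by simpa using Nat.lt_trans hpp hp)]
    rw [mset_set _ _ _ (by simpa using Nat.lt_trans hpp hp),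
        getD_set_ne _ _ _ _ _ (Nat.ne_of_gt hpp),
        mset_set _ _ _ hp]
    rw [Multiset.erase_cons_head]
    exact (mset_set h pos ni hp).symm
  | case2 => rfl
  | case3 => rfl

lemma sul_spec (h : List Int) (endpos pos : Nat) : endpos = h.length → pos < endpos →
    (pvSiftupLoop h endpos pos).1.length = h.length ∧
    pos ≤ (pvSiftupLoop h endpos pos).2 ∧ (pvSiftupLoop h endpos pos).2 < endpos ∧
    2 * (pvSiftupLoop h endpos pos).2 + 1 ≥ endpos ∧
    ∀ v : Int, (↑((pvSiftupLoop h endpos pos).1.set (pvSiftupLoop h endpos pos).2 v) : Multiset Int)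
        = (↑(h.set pos v) : Multiset Int) := by
  fun_induction pvSiftupLoop h endpos pos with
  | case1 h pos childpos hc rightpos childpos2 ih =>
    intro he hp
    have hc2 : childpos2 < endpos ∧ pos < childpos2 := by
      simp only [childpos2]; split <;> omega
    have hlen : (h.set pos (h.getD childpos2 0)).length = h.length := by simp
    obtain ⟨l1, l2, l3, l5, l4⟩ := ih (by rw [hlen, he]) hc2.1
    refine ⟨by rw [l1, hlen], by omega, l3, l5, ?_⟩
    intro v
    rw [l4 v]
    have hcl : childpos2 < h.length := by omega
    have hpl : pos < h.length := by omega
    rw [mset_set (h.set pos (h.getD childpos2 0)) childpos2 v (by simpa using hcl),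
        getD_set_ne _ _ _ _ _ (by omega), mset_set h pos _ hpl, Multiset.erase_cons_head]
    exact (mset_set h pos v hpl).symm
  | case2 h pos hc =>
    intro he hp
    exact ⟨rfl, le_refl _, hp, by omega, fun v => rfl⟩

lemma getD_set_self (h : List Int) (i : Nat) (v d : Int) (hi : i < h.length) :
    (h.set i v).getD i d = v := by
  rw [List.getD_eq_getElem?_getD, List.getElem?_set_self hi]
  rfl

-- HeapProp of a final `h.set pos ni` write, from the loop invariants (the shared
-- exit-case argument of pvSiftdownLoop with startpos = 0)
lemma set_heap (h : List Int) (ni : Int) (pos : Nat) (hp : pos < h.length)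
    (I1 : ∀ i j : Nat, (j = 2*i+1 ∨ j = 2*i+2) → j < h.length → j ≠ pos → h.getD i 0 ≤ h.getD j 0)
    (I2 : ∀ j : Nat, (j = 2*pos+1 ∨ j = 2*pos+2) → j < h.length → ni ≤ h.getD j 0)
    (hpar : 0 < pos → h.getD ((pos-1)/2) 0 ≤ ni) :
    HeapProp (h.set pos ni) := by
  intro i j hrel hj
  rw [List.length_set] at hj
  by_cases hjp : j = pos
  · subst hjp
    have hip : i = (j-1)/2 := by omega
    have hine : i ≠ j := by omega
    rw [getD_set_ne _ _ _ _ _ (Ne.symm hine), getD_set_self _ _ _ _ hp, hip]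
    exact hpar (by omega)
  · rw [getD_set_ne _ _ _ _ _ (Ne.symm hjp)]
    by_cases hip : i = pos
    · subst hip
      rw [getD_set_self _ _ _ _ hp]
      exact I2 j hrel hj
    · rw [getD_set_ne _ _ _ _ _ (fun e => hip e.symm)]
      exact I1 i j hrel hj hjp

lemma sdl_heap (h : List Int) (ni : Int) (pos : Nat) : pos < h.length →
    (∀ i j : Nat, (j = 2*i+1 ∨ j = 2*i+2) → j < h.length → j ≠ pos → h.getD i 0 ≤ h.getD j 0) →
    (∀ j : Nat, (j = 2*pos+1 ∨ j = 2*pos+2) → j < h.length →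
          ni ≤ h.getD j 0 ∧ (0 < pos → h.getD ((pos-1)/2) 0 ≤ h.getD j 0)) →
    HeapProp (pvSiftdownLoop h ni 0 pos) := by
  fun_induction pvSiftdownLoop h ni 0 pos with
  | case1 h pos hsp parentpos parent hlt ih =>
    intro hp I1 I2
    have hppdef : parentpos = (pos-1)/2 := rfl
    have hpp : parentpos < pos := by omega
    have hppl : parentpos < h.length := by omega
    have hrelp : pos = 2*parentpos+1 ∨ pos = 2*parentpos+2 := by omega
    apply ih (by simp; omega)
    · -- I1 for h.set pos parent at parentpos
      intro i j hrel hj hjne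
      rw [List.length_set] at hj
      by_cases hjp : j = pos
      · subst hjp
        have hip : i = parentpos := by omega
        subst hip
        rw [getD_set_self _ _ _ _ hp, getD_set_ne _ _ _ _ _ (by omega)]
      · rw [getD_set_ne _ _ _ _ _ (Ne.symm hjp)]
        by_cases hip : i = pos
        · subst hip
          rw [getD_set_self _ _ _ _ hp]
          exact (I2 j hrel hj).2 (by omega)
        · rw [getD_set_ne _ _ _ _ _ (fun e => hip e.symm)]
          exact I1 i j hrel hj hjp
    · -- I2 for h.set pos parent at parentpos
      intro j hrel hj
      rw [List.length_set] at hj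
      by_cases hjp : j = pos
      · subst hjp
        rw [getD_set_self _ _ _ _ hp]
        constructor
        · exact le_of_lt hlt
        · intro hpp0
          rw [getD_set_ne _ _ _ _ _ (show j ≠ (parentpos-1)/2 by omega)]
          exact I1 ((parentpos-1)/2) parentpos (by omega) hppl (by omega)
      · rw [getD_set_ne _ _ _ _ _ (Ne.symm hjp)]
        have hpj : h.getD parentpos 0 ≤ h.getD j 0 := I1 parentpos j hrel hj hjp
        constructor
        · exact le_trans (le_of_lt hlt) hpj
        · intro hpp0
          rw [getD_set_ne _ _ _ _ _ (show pos ≠ (parentpos-1)/2 by omega)]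
          exact le_trans (I1 ((parentpos-1)/2) parentpos (by omega) hppl (by omega)) hpj
  | case2 h pos hsp parentpos parent hlt =>
    intro hp I1 I2
    exact set_heap h ni pos hp I1 (fun j hr hj => (I2 j hr hj).1)
      (fun h0 => not_lt.mp hlt)
  | case3 h pos hsp =>
    intro hp I1 I2
    have hpos0 : pos = 0 := by omega
    exact set_heap h ni pos hp I1 (fun j hr hj => (I2 j hr hj).1) (by omega)

lemma sul_heap (h : List Int) (endpos pos : Nat) : endpos = h.length → pos < endpos →
    (∀ i j : Nat, (j = 2*i+1 ∨ j = 2*i+2) → j < h.length → i ≠ pos → j ≠ pos → h.getD i 0 ≤ h.getD j 0) →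
    (∀ j : Nat, (j = 2*pos+1 ∨ j = 2*pos+2) → j < h.length → 0 < pos → h.getD ((pos-1)/2) 0 ≤ h.getD j 0) →
    (∀ i j : Nat, (j = 2*i+1 ∨ j = 2*i+2) → j < h.length → j ≠ (pvSiftupLoop h endpos pos).2 →
        (pvSiftupLoop h endpos pos).1.getD i 0 ≤ (pvSiftupLoop h endpos pos).1.getD j 0) ∧
    (∀ j : Nat, (j = 2*(pvSiftupLoop h endpos pos).2+1 ∨ j = 2*(pvSiftupLoop h endpos pos).2+2) → j < h.length →
        0 < (pvSiftupLoop h endpos pos).2 →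
        (pvSiftupLoop h endpos pos).1.getD (((pvSiftupLoop h endpos pos).2-1)/2) 0 ≤ (pvSiftupLoop h endpos pos).1.getD j 0) := by
  fun_induction pvSiftupLoop h endpos pos with
  | case1 h pos childpos hc rightpos childpos2 ih =>
    intro he hp J1 J2
    have hcdef : childpos = 2*pos+1 := rfl
    have hsel : childpos2 = if rightpos < endpos ∧ ¬ h.getD childpos 0 < h.getD rightpos 0 then rightpos else childpos := rfl
    have hkey : (childpos2 = childpos ∨ childpos2 = rightpos) ∧ childpos2 < endpos ∧
        (∀ j : Nat, (j = 2*pos+1 ∨ j = 2*pos+2) → j < endpos → h.getD childpos2 0 ≤ h.getD j 0) := by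
      by_cases hcond : rightpos < endpos ∧ ¬ h.getD childpos 0 < h.getD rightpos 0
      · rw [if_pos hcond] at hsel
        refine ⟨Or.inr hsel, by omega, ?_⟩
        intro j hrel hj
        rcases (show j = childpos ∨ j = rightpos by omega) with hj2 | hj2
        · rw [hsel, hj2]; exact not_lt.mp hcond.2
        · rw [hsel, hj2]
      · rw [if_neg hcond] at hsel
        refine ⟨Or.inl hsel, by omega, ?_⟩
        intro j hrel hj
        rcases (show j = childpos ∨ j = rightpos by omega) with hj2 | hj2
        · rw [hsel, hj2]
        · rcases not_and_or.mp hcond with hb | hb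
          · omega
          · rw [hsel, hj2]; exact le_of_lt (not_not.mp hb)
    have hc2 : (childpos2 = childpos ∨ childpos2 = rightpos) ∧ childpos2 < endpos := ⟨hkey.1, hkey.2.1⟩
    have hc2l : childpos2 < h.length := by omega
    have hpl : pos < h.length := by omega
    have hmin : ∀ j : Nat, (j = 2*pos+1 ∨ j = 2*pos+2) → j < h.length →
        h.getD childpos2 0 ≤ h.getD j 0 := by
      intro j hrel hj
      exact hkey.2.2 j hrel (by omega)
    have hlen' : (h.set pos (h.getD childpos2 0)).length = h.length := by simp
    rw [← hlen']
    apply ih (by omega) (by omega)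
    · intro i j hrel hj hine hjne
      rw [hlen'] at hj
      by_cases hjp : j = pos
      · subst hjp
        have hip : i = (j-1)/2 := by omega
        have hj0 : 0 < j := by omega
        rw [getD_set_ne _ _ _ _ _ (show j ≠ i by omega), getD_set_self _ _ _ _ hpl]
        rw [hip]
        exact J2 childpos2 (by omega) hc2l hj0
      · rw [getD_set_ne _ _ _ _ _ (Ne.symm hjp)]
        by_cases hip : i = pos
        · subst hip
          rw [getD_set_self _ _ _ _ hpl]
          exact hmin j (by omega) hj
        · rw [getD_set_ne _ _ _ _ _ (fun e => hip e.symm)]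
          exact J1 i j hrel hj hip hjp
    · intro j hrel hj _
      rw [hlen'] at hj
      have hpar : (childpos2-1)/2 = pos := by omega
      rw [hpar, getD_set_self _ _ _ _ hpl,
          getD_set_ne _ _ _ _ _ (show pos ≠ j by omega)]
      exact J1 childpos2 j hrel hj (by omega) (by omega)
  | case2 h pos hc =>
    intro he hp J1 J2
    refine ⟨?_, J2⟩
    intro i j hrel hj hjne
    by_cases hip : i = pos
    · omega
    · exact J1 i j hrel hj hip hjne

lemma getD_append_left (h t : List Int) (i : Nat) (d : Int) (hi : i < h.length) :
    (h ++ t).getD i d = h.getD i d := by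
  rw [List.getD_eq_getElem?_getD, List.getD_eq_getElem?_getD, List.getElem?_append_left hi]

lemma push_spec (h : List Int) (x : Int) (hh : HeapProp h) :
    HeapProp (pvHeappush h x) ∧ (↑(pvHeappush h x) : Multiset Int) = x ::ₘ (↑h : Multiset Int) := by
  have hp : h.length < (h ++ [x]).length := by simp
  constructor
  · apply sdl_heap _ _ _ hp
    · intro i j hrel hj hjne
      rw [List.length_append, List.length_cons, List.length_nil] at hj
      have hjl : j < h.length := by omega
      have hil : i < h.length := by omega
      rw [getD_append_left _ _ _ _ hjl, getD_append_left _ _ _ _ hil]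
      exact hh i j hrel hjl
    · intro j hrel hj
      rw [List.length_append, List.length_cons, List.length_nil] at hj
      omega
  · rw [show pvHeappush h x = pvSiftdownLoop (h ++ [x]) x 0 h.length from rfl,
       sdl_mset _ _ _ _ hp, mset_set _ _ _ hp]
    have hx : (h ++ [x]).getD h.length 0 = x := by
      rw [List.getD_eq_getElem?_getD, List.getElem?_append_right (le_refl _)]
      simp
    rw [hx]
    congr 1
    rw [show ((h ++ [x] : List Int) : Multiset Int) = ↑h + ↑([x] : List Int) by
          rw [← Multiset.coe_add]]
    rw [show (↑([x] : List Int) : Multiset Int) = {x} from rfl]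
    rw [add_comm, Multiset.singleton_add, Multiset.erase_cons_head]

lemma getD_dropLast (h : List Int) (i : Nat) (d : Int) (hi : i < h.length - 1) :
    h.dropLast.getD i d = h.getD i d := by
  rw [List.getD_eq_getElem h.dropLast d (by simpa using hi),
      List.getD_eq_getElem h d (by omega), List.getElem_dropLast]

lemma pop_spec (h : List Int) (hh : HeapProp h) (hne : h ≠ []) :
    HeapProp (pvHeappop h).2 ∧
    (↑(pvHeappop h).2 : Multiset Int) = (↑h : Multiset Int).erase (h.getD 0 0) := by
  have hl : 0 < h.length := List.length_pos_iff.mpr hne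
  by_cases hre : h.dropLast.isEmpty = true
  · have h1 : h.length = 1 := by
      rw [List.isEmpty_iff] at hre
      have hthis : h.dropLast.length = h.length - 1 := List.length_dropLast
      rw [hre] at hthis
      simp at hthis
      omega
    obtain ⟨a, ha⟩ := List.length_eq_one_iff.mp h1
    subst ha
    constructor
    · intro i j hrel hj
      rw [show (pvHeappop [a]).2 = [] from rfl] at hj
      simp at hj
    · rw [show (pvHeappop [a]).2 = [] from rfl]
      rw [show ([a] : List Int).getD 0 0 = a from rfl]
      rw [show ((↑([a] : List Int) : Multiset Int)) = a ::ₘ 0 from rfl,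
          Multiset.erase_cons_head]
      rfl
  · have hrl : h.dropLast.length = h.length - 1 := List.length_dropLast
    have hre' : h.dropLast ≠ [] := fun e => hre (by rw [e]; rfl)
    have h2 : 2 ≤ h.length := by
      rcases Nat.lt_or_ge h.length 2 with hc | hc
      · exfalso; apply hre'
        have : h.dropLast.length = 0 := by omega
        exact List.length_eq_zero_iff.mp this
      · exact hc
    set lastelt := h.getD (h.length - 1) 0 with hld
    set arr := h.dropLast.set 0 lastelt with harr
    have heq : pvHeappop h = (h.dropLast.getD 0 0, pvSiftup arr 0) := by
      unfold pvHeappop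
      rw [if_neg hre]
    have harl : arr.length = h.length - 1 := by rw [harr, List.length_set, hrl]
    have harl0 : 0 < arr.length := by omega
    obtain ⟨l1, l2, l3, l5, l4⟩ := sul_spec arr arr.length 0 rfl harl0
    -- pvSiftup arr 0 unfolds to the loop + final siftdown
    have hsu : pvSiftup arr 0 = pvSiftdownLoop (pvSiftupLoop arr arr.length 0).1
        (arr.getD 0 0) 0 (pvSiftupLoop arr arr.length 0).2 := rfl
    have hJ1 : ∀ i j : Nat, (j = 2*i+1 ∨ j = 2*i+2) → j < arr.length → i ≠ 0 → j ≠ 0 →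
        arr.getD i 0 ≤ arr.getD j 0 := by
      intro i j hrel hj hi0 hj0
      have hjl : j < h.length - 1 := by omega
      have hil : i < h.length - 1 := by omega
      rw [harr, getD_set_ne _ _ _ _ _ (fun e => hi0 e.symm),
          getD_set_ne _ _ _ _ _ (fun e => hj0 e.symm),
          getD_dropLast _ _ _ hil, getD_dropLast _ _ _ hjl]
      exact hh i j hrel (by omega)
    have hJ2 : ∀ j : Nat, (j = 2*0+1 ∨ j = 2*0+2) → j < arr.length → 0 < 0 →
        arr.getD ((0-1)/2) 0 ≤ arr.getD j 0 := by
      intro j _ _ h0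
      omega
    obtain ⟨K1, K2⟩ := sul_heap arr arr.length 0 rfl harl0 hJ1 hJ2
    have hr2 : (pvSiftupLoop arr arr.length 0).2 < (pvSiftupLoop arr arr.length 0).1.length := by
      rw [l1]; exact l3
    constructor
    · rw [heq]
      show HeapProp (pvSiftup arr 0)
      rw [hsu]
      apply sdl_heap _ _ _ hr2
      · intro i j hrel hj hjne
        exact K1 i j hrel (by rw [l1] at hj; exact hj) hjne
      · intro j hrel hj
        rw [l1] at hj
        omega
    · rw [heq]
      show (↑(pvSiftup arr 0) : Multiset Int) = (↑h : Multiset Int).erase (h.getD 0 0)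
      rw [hsu, sdl_mset _ _ _ _ hr2, l4, mset_set _ _ _ harl0,
          Multiset.cons_erase (by
            rw [List.getD_eq_getElem arr 0 harl0]
            exact List.getElem_mem harl0)]
      rw [harr, mset_set _ _ _ (by omega), getD_dropLast _ _ _ (by omega)]
      have hcast : (↑h : Multiset Int) = (↑h.dropLast : Multiset Int) + {h.getLast hne} := by
        conv_lhs => rw [show h = h.dropLast ++ [h.getLast hne] from (List.dropLast_append_getLast hne).symm]
        rw [← Multiset.coe_add]
        rfl
      have hmem0 : h.getD 0 0 ∈ (↑h.dropLast : Multiset Int) := by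
        have : h.dropLast.getD 0 0 = h.getD 0 0 := getD_dropLast _ _ _ (by omega)
        rw [← this, List.getD_eq_getElem h.dropLast 0 (by omega)]
        exact List.getElem_mem (by omega)
      rw [hcast, Multiset.erase_add_left_pos _ hmem0]
      have hlast : lastelt = h.getLast hne := by
        rw [hld, List.getD_eq_getElem h 0 (by omega), List.getLast_eq_getElem]
      rw [hlast, add_comm, Multiset.singleton_add]

lemma heap_root_le (h : List Int) (hh : HeapProp h) :
    ∀ j, j < h.length → h.getD 0 0 ≤ h.getD j 0 := by
  intro j
  induction j using Nat.strong_induction_on with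
  | _ j ih =>
    intro hj
    cases Nat.eq_zero_or_pos j with
    | inl h0 => subst h0; exact le_refl _
    | inr h0 =>
      have hrel : j = 2*((j-1)/2)+1 ∨ j = 2*((j-1)/2)+2 := by omega
      exact le_trans (ih ((j-1)/2) (by omega) (by omega)) (hh ((j-1)/2) j hrel hj)

lemma heap_root_min (h : List Int) (hh : HeapProp h) (hne : h ≠ []) :
    h.getD 0 0 ∈ h ∧ ∀ y ∈ h, h.getD 0 0 ≤ y := by
  have hl : 0 < h.length := List.length_pos_iff.mpr hne
  constructor
  · rw [List.getD_eq_getElem h 0 hl]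
    exact List.getElem_mem hl
  · intro y hy
    obtain ⟨i, hi, hiy⟩ := List.mem_iff_getElem.mp hy
    rw [← hiy, ← List.getD_eq_getElem h 0 hi]
    exact heap_root_le h hh i hi

lemma min_unique {M : Multiset Int} {a b : Int} (ha : a ∈ M) (hma : ∀ y ∈ M, a ≤ y)
    (hb : b ∈ M) (hmb : ∀ y ∈ M, b ≤ y) : a = b :=
  le_antisymm (hma b hb) (hmb a ha)

lemma SD_perm (l : List Int) : (SD l).Perm l := PySem.List.sorted_perm l (fun x => x) true

lemma SD_pairwise (l : List Int) : (SD l).Pairwise (fun a b : Int => b ≤ a) := by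
  exact PySem.List.sorted_pairwise_rev l (fun x => x)

lemma SD_append (l : List Int) (s : Int) :
    SD (l ++ [s]) = List.orderedInsert (fun a b : Int => b ≤ a) s (SD l) := by
  haveI hTot : Std.Total (fun a b : Int => b ≤ a) := ⟨fun a b => le_total b a⟩
  haveI hTrans : Trans (fun a b : Int => b ≤ a) (fun a b : Int => b ≤ a) (fun a b : Int => b ≤ a) := ⟨fun hab hbc => le_trans hbc hab⟩
  haveI hAnti : Std.Antisymm (fun a b : Int => b ≤ a) := ⟨fun a b h1 h2 => le_antisymm h2 h1⟩
  refine List.Perm.eq_of_pairwise (le := fun a b : Int => b ≤ a) ?_ ?_ ?_ ?_ <;>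
    first
    | exact fun a b _ _ h1 h2 => le_antisymm h2 h1
    | exact ((SD_perm (l ++ [s])).trans (List.perm_append_singleton s l)).trans
        (((List.perm_orderedInsert (fun a b : Int => b ≤ a) s (SD l)).trans ((SD_perm l).cons s)).symm)
    | exact SD_pairwise (l ++ [s])
    | exact List.Pairwise.orderedInsert s (SD l) (SD_pairwise l)

lemma getD_take (L : List Int) (n i : Nat) (d : Int) (hi : i < n) :
    (L.take n).getD i d = L.getD i d := by
  rcases Nat.lt_or_ge i L.length with hil | hil
  · rw [List.getD_eq_getElem _ _ (by simp; omega), List.getD_eq_getElem _ _ hil,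
        List.getElem_take]
  · rw [List.getD_eq_getElem?_getD, List.getD_eq_getElem?_getD,
        List.getElem?_eq_none (by simp; omega), List.getElem?_eq_none (by omega)]

lemma desc_getD_le (L : List Int) (hs : L.Pairwise (fun a b : Int => b ≤ a))
    (i j : Nat) (hij : i ≤ j) (hj : j < L.length) : L.getD j 0 ≤ L.getD i 0 := by
  rcases Nat.eq_or_lt_of_le hij with he | hlt
  · subst he; exact le_refl _
  · rw [List.getD_eq_getElem _ _ hj, List.getD_eq_getElem _ _ (by omega)]
    exact (List.pairwise_iff_getElem.mp hs) i j (by omega) hj hlt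

lemma coe_take_succ (L : List Int) (m : Nat) (hm : m < L.length) :
    (↑(L.take (m+1)) : Multiset Int) = (↑(L.take m) : Multiset Int) + {L.getD m 0} := by
  rw [List.take_succ, List.getElem?_eq_getElem hm, ← Multiset.coe_add,
      List.getD_eq_getElem _ _ hm]
  rfl

lemma take_ins (s : Int) (L : List Int) (kn : Nat) (hk : 1 ≤ kn)
    (hs : L.Pairwise (fun a b : Int => b ≤ a)) :
    (↑(List.take kn (List.orderedInsert (fun a b : Int => b ≤ a) s L)) : Multiset Int) =
      if kn ≤ L.length then
        (if L.getD (kn-1) 0 < s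
         then s ::ₘ ((↑(L.take kn) : Multiset Int).erase (L.getD (kn-1) 0))
         else (↑(L.take kn) : Multiset Int))
      else s ::ₘ (↑(L.take kn) : Multiset Int) := by
  induction L generalizing kn with
  | nil =>
    rw [if_neg (by simp; omega)]
    simp [List.orderedInsert, List.take_of_length_le (l := [s]) (by simp; omega)]
  | cons b t iht =>
    obtain ⟨m, rfl⟩ : ∃ m, kn = m + 1 := ⟨kn - 1, by omega⟩
    simp only [Nat.add_sub_cancel]
    have hpt : t.Pairwise (fun a b : Int => b ≤ a) := (List.pairwise_cons.mp hs).2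
    have hhead : ∀ x ∈ t, x ≤ b := (List.pairwise_cons.mp hs).1
    by_cases hbs : b ≤ s
    · rw [show List.orderedInsert (fun a b : Int => b ≤ a) s (b :: t) = s :: b :: t by
          simp [List.orderedInsert, hbs]]
      rw [show (s :: b :: t).take (m+1) = s :: (b :: t).take m from rfl]
      rw [show ((↑(s :: (b :: t).take m) : Multiset Int)) = s ::ₘ ↑((b :: t).take m) from rfl]
      by_cases hkl : m + 1 ≤ (b :: t).length
      · rw [if_pos hkl]
        have hgb : (b :: t).getD m 0 ≤ b := by
          have := desc_getD_le (b :: t) hs 0 m (by omega) (by simpa using hkl)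
          simpa using this
        by_cases hgs : (b :: t).getD m 0 < s
        · rw [if_pos hgs]
          congr 1
          rw [coe_take_succ _ _ (by simpa using hkl)]
          rw [add_comm, Multiset.singleton_add, Multiset.erase_cons_head]
        · rw [if_neg hgs]
          have hse : s = (b :: t).getD m 0 :=
            le_antisymm (by omega) (le_trans hgb hbs)
          rw [coe_take_succ _ _ (by simpa using hkl), ← hse, add_comm, Multiset.singleton_add]
      · rw [if_neg hkl]
        have hml : (b :: t).length ≤ m := by simp at hkl ⊢; omega
        congr 1
        rw [List.take_of_length_le hml, List.take_of_length_le (by omega)]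
    · have hins : List.orderedInsert (fun a b : Int => b ≤ a) s (b :: t) =
          b :: List.orderedInsert (fun a b : Int => b ≤ a) s t := by
        simp [List.orderedInsert, hbs]
      rw [hins]
      cases m with
      | zero =>
        rw [if_pos (by simp)]
        rw [if_neg (show ¬((b :: t).getD 0 0 < s) from fun h => hbs (le_of_lt h))]
        rfl
      | succ m' =>
        have ihm := iht (m'+1) (by omega) hpt
        simp only [Nat.add_sub_cancel] at ihm
        rw [show (b :: List.orderedInsert (fun a b : Int => b ≤ a) s t).take (m'+1+1)
              = b :: (List.orderedInsert (fun a b : Int => b ≤ a) s t).take (m'+1) from rfl]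
        rw [show ((↑(b :: (List.orderedInsert (fun a b : Int => b ≤ a) s t).take (m'+1)) : Multiset Int))
              = b ::ₘ ↑((List.orderedInsert (fun a b : Int => b ≤ a) s t).take (m'+1)) from rfl]
        rw [show ((b :: t).take (m'+1+1)) = b :: t.take (m'+1) from rfl]
        rw [show ((↑(b :: t.take (m'+1)) : Multiset Int)) = b ::ₘ ↑(t.take (m'+1)) from rfl]
        by_cases hkl : m'+1 ≤ t.length
        · rw [if_pos (show m'+1+1 ≤ (b :: t).length by simp only [List.length_cons]; omega)]
          rw [if_pos hkl] at ihm
          by_cases hgs : t.getD m' 0 < s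
          · rw [if_pos hgs] at ihm
            rw [if_pos (show (b :: t).getD (m'+1) 0 < s from hgs)]
            rw [ihm]
            have hmem : t.getD m' 0 ∈ (↑(t.take (m'+1)) : Multiset Int) := by
              rw [← getD_take t (m'+1) m' 0 (by omega),
                  List.getD_eq_getElem _ _ (by simp only [List.length_take]; omega)]
              exact Multiset.mem_coe.mpr (List.getElem_mem _)
            rw [show ((b :: t).getD (m'+1) 0) = t.getD m' 0 from rfl,
                mem_cons_erase hmem, Multiset.cons_swap]
          · rw [if_neg hgs] at ihm
            rw [if_neg (show ¬((b :: t).getD (m'+1) 0 < s) from hgs)]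
            rw [ihm]
        · rw [if_neg (show ¬(m'+1+1 ≤ (b :: t).length) by simp only [List.length_cons]; omega)]
          rw [if_neg hkl] at ihm
          rw [ihm, Multiset.cons_swap]

lemma take_last_min (L : List Int) (kn : Nat) (hk : 1 ≤ kn) (hL : L ≠ [])
    (hs : L.Pairwise (fun a b : Int => b ≤ a)) :
    L.getD (min kn L.length - 1) 0 ∈ L.take kn ∧
    ∀ y ∈ L.take kn, L.getD (min kn L.length - 1) 0 ≤ y := by
  have hl : 0 < L.length := List.length_pos_iff.mpr hL
  have hjlt : min kn L.length - 1 < min kn L.length := by omega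
  have hjL : min kn L.length - 1 < L.length := by omega
  constructor
  · rw [← getD_take L kn (min kn L.length - 1) 0 (by omega),
        List.getD_eq_getElem _ _ (by simp only [List.length_take]; omega)]
    exact List.getElem_mem _
  · intro y hy
    obtain ⟨i, hi, hiy⟩ := List.mem_iff_getElem.mp hy
    have hi' : i < min kn L.length := by simpa using hi
    rw [← hiy, ← List.getD_eq_getElem _ _ hi, getD_take L kn i 0 (by omega)]
    exact desc_getD_le L hs i (min kn L.length - 1) (by omega) hjL

lemma main_loop (k : Int) (hk : 1 ≤ k) (rest heap cur res : List Int)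
    (h1 : HeapProp heap)
    (h2 : (↑heap : Multiset Int) = (↑((SD cur).take k.toNat) : Multiset Int)) :
    (rest.foldl (fun (st : List Int × List Int) pop_s =>
        let hp := st.1
        let hp' :=
          if (hp.length : Int) = k then
            if hp.getD 0 0 < pop_s then pvHeappush (pvHeappop hp).2 pop_s else hp
          else pvHeappush hp pop_s
        (hp', st.2 ++ [hp'.getD 0 0])) (heap, res)).2 =
    (rest.foldl (fun (st : List Int × List Int) s =>
        let cur' := st.1 ++ [s]
        let srt := PySem.List.sorted cur' (fun x => x) true
        (cur', st.2 ++ [PySem.List.pyGetD srt (min k (srt.length : Int) - 1) 0])) (cur, res)).2 := by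
  induction rest generalizing heap cur res with
  | nil => rfl
  | cons s rest' ih =>
    have hkn : 1 ≤ k.toNat := by omega
    have hLlen : (SD cur).length = cur.length := (SD_perm cur).length_eq
    have hheaplen : heap.length = min k.toNat (SD cur).length := by
      have hc := congrArg Multiset.card h2
      simpa using hc
    set heap2 := (if (heap.length : Int) = k then
        (if heap.getD 0 0 < s then pvHeappush (pvHeappop heap).2 s else heap)
      else pvHeappush heap s) with hh2
    have hstep : HeapProp heap2 ∧ (↑heap2 : Multiset Int) = ↑((SD (cur ++ [s])).take k.toNat) := by
      rw [SD_append]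
      have htins := take_ins s (SD cur) k.toNat hkn (SD_pairwise cur)
      by_cases hfull : (heap.length : Int) = k
      · have hfl : heap.length = k.toNat := by omega
        have hkle : k.toNat ≤ (SD cur).length := by omega
        have hne : heap ≠ [] := by
          intro e; rw [e] at hfl; simp at hfl; omega
        obtain ⟨hm_mem, hm_min⟩ := heap_root_min heap h1 hne
        have hSDne : SD cur ≠ [] := by
          intro e; rw [e] at hkle; simp at hkle; omega
        obtain ⟨hg_mem, hg_min⟩ := take_last_min (SD cur) k.toNat hkn hSDne (SD_pairwise cur)
        have hminkl : min k.toNat (SD cur).length - 1 = k.toNat - 1 := by omega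
        rw [hminkl] at hg_mem hg_min
        have hmg : heap.getD 0 0 = (SD cur).getD (k.toNat - 1) 0 := by
          apply min_unique (M := (↑((SD cur).take k.toNat) : Multiset Int))
          · rw [← h2]; exact Multiset.mem_coe.mpr hm_mem
          · intro y hy
            rw [← h2] at hy
            exact hm_min y (Multiset.mem_coe.mp hy)
          · exact Multiset.mem_coe.mpr hg_mem
          · intro y hy
            exact hg_min y (Multiset.mem_coe.mp hy)
        rw [hh2, if_pos hfull]
        by_cases hcmp : heap.getD 0 0 < s
        · rw [if_pos hcmp]
          obtain ⟨hph, hpm⟩ := pop_spec heap h1 hne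
          obtain ⟨hqh, hqm⟩ := push_spec _ s hph
          refine ⟨hqh, ?_⟩
          rw [hqm, hpm, htins, if_pos hkle, if_pos (by rw [← hmg]; exact hcmp)]
          rw [h2, hmg]
        · rw [if_neg hcmp]
          refine ⟨h1, ?_⟩
          rw [htins, if_pos hkle, if_neg (by rw [← hmg]; exact hcmp)]
          exact h2
      · have hlt : (SD cur).length < k.toNat := by omega
        rw [hh2, if_neg hfull]
        obtain ⟨hqh, hqm⟩ := push_spec heap s h1
        refine ⟨hqh, ?_⟩
        rw [hqm, htins, if_neg (by omega), h2]
    have hlen' : (SD (cur ++ [s])).length = cur.length + 1 := by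
      rw [(SD_perm _).length_eq]; simp
    have hne2 : heap2 ≠ [] := by
      have hcard := congrArg Multiset.card hstep.2
      simp only [Multiset.coe_card, List.length_take] at hcard
      intro e
      rw [e] at hcard
      simp at hcard
      omega
    obtain ⟨h2mem, h2min⟩ := heap_root_min heap2 hstep.1 hne2
    have hSDne' : SD (cur ++ [s]) ≠ [] := by
      intro e; rw [e] at hlen'; simp at hlen'
    obtain ⟨hbmem, hbmin⟩ := take_last_min (SD (cur ++ [s])) k.toNat hkn hSDne' (SD_pairwise _)
    have hv : heap2.getD 0 0
        = (SD (cur ++ [s])).getD (min k.toNat (SD (cur ++ [s])).length - 1) 0 := by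
      apply min_unique (M := (↑((SD (cur ++ [s])).take k.toNat) : Multiset Int))
      · rw [← hstep.2]; exact Multiset.mem_coe.mpr h2mem
      · intro y hy
        rw [← hstep.2] at hy
        exact h2min y (Multiset.mem_coe.mp hy)
      · exact Multiset.mem_coe.mpr hbmem
      · intro y hy
        exact hbmin y (Multiset.mem_coe.mp hy)
    have hidx : PySem.List.pyGetD (SD (cur ++ [s])) (min k ((SD (cur ++ [s])).length : Int) - 1) 0
        = (SD (cur ++ [s])).getD (min k.toNat (SD (cur ++ [s])).length - 1) 0 := by
      have hcast : (min k ((SD (cur ++ [s])).length : Int) - 1)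
          = ((min k.toNat (SD (cur ++ [s])).length - 1 : Nat) : Int) := by
        omega
      rw [hcast, PySem.List.pyGetD_natCast]
    have happ : heap2.getD 0 0
        = PySem.List.pyGetD (SD (cur ++ [s])) (min k ((SD (cur ++ [s])).length : Int) - 1) 0 := by
      rw [hidx]; exact hv
    simp only [List.foldl_cons]
    rw [← hh2, happ]
    exact ih heap2 (cur ++ [s]) (res ++ [PySem.List.pyGetD (SD (cur ++ [s]))
        (min k ((SD (cur ++ [s])).length : Int) - 1) 0]) hstep.1 hstep.2

-- ===== VERDICT (by name: the statement is the Claim_ definition above) =====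
theorem solution_spec : Claim_equal_solution := by
  intro k score _ hpre
  unfold Spec_solution solution solution_alt
  rcases hpre with hk | hs
  · exact (main_loop k hk score [] [] [] (by intro i j _ hj; simp at hj) (by rw [show SD [] = [] from rfl]; simp))
  · subst hs; rfl
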